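-- pv_equiv track=rewrite | github.com/yomhub/CodeLab | python/DP/1d.py | primes_sequence
-- ===== SOURCE A (Python) =====
-- def primes_sequence(A, B, C, D):
--     """
--     Given three prime numbers A, B and C and an integer D.
--     find the first(smallest) D integers which only have A, B, C or a combination of them as their prime factors.
--     """
--     x = 0
--     y = 0
--     z = 0
--     k = D
--     ans = [0]*(k+1)
--     ans[0] = 1
--     for i in range(1, k+1):
--         temp = min(A*ans[x], B*ans[y], C*ans[z])
--         ans[i] = temp
--         if temp == A*ans[x]:
--             x += 1
--         if temp == B*ans[y]:
--             y += 1
--         if temp == C*ans[z]: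
--             z += 1
--     return ans[1:]
-- ===== SOURCE B (Python) =====
-- from collections import deque
--
-- def primes_sequence(A, B, C, D):
--     # Three FIFO queues of pending multiples instead of an answer array with
--     # three index pointers.  Equivalence is about the return value only.
--     res = []
--     qa, qb, qc = deque([A]), deque([B]), deque([C])
--     for _ in range(D):
--         t = min(qa[0], qb[0], qc[0])
--         res.append(t)
--         if qa[0] == t:
--             qa.popleft()
--         if qb[0] == t:
--             qb.popleft()
--         if qc[0] == t:
--             qc.popleft()
--         qa.append(A * t)
--         qb.append(B * t)
--         qc.append(C * t)
--     return res
-- ===== Notes on version B (the rewrite author's own statement) =====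
-- stated objective: alternative
-- what changed: Replaces the preallocated answer array with three index pointers by three FIFO queues of pending multiples: each step takes the minimum of the three queue fronts, pops the fronts equal to it, and enqueues its three new multiples; no indexed array remains.
import Mathlib
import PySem

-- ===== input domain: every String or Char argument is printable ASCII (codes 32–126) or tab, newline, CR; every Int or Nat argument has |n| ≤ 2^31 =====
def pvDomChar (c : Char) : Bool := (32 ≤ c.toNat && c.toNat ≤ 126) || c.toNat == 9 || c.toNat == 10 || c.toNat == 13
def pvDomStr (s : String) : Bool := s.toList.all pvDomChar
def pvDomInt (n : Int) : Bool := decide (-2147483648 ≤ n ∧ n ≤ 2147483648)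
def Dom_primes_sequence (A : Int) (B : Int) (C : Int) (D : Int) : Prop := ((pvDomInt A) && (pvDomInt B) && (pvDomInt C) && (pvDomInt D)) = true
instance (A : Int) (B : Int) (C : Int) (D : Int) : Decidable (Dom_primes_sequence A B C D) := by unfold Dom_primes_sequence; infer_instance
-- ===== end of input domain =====

-- ===== PORT A =====
-- One honest line: B keeps three FIFO queues of pending multiples instead of A's
-- answer array indexed by three pointers; same O(D) cost, different data structure.
-- A-side helper: the body of A's for-loop (reads ans[x],ans[y],ans[z], writes ans[i]).
-- The pyGetD reads are exact here: x,y,z stay nonnegative and strictly below the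
-- filled prefix of ans, so the Python indexings never raise (proved in the lemmas).
def pvStepA (A : Int) (B : Int) (C : Int)
    (s : List Int × Int × Int × Int) (i : Int) : List Int × Int × Int × Int :=
  let ans := s.1
  let x := s.2.1
  let y := s.2.2.1
  let z := s.2.2.2
  let temp := min (min (A * PySem.List.pyGetD ans x 0) (B * PySem.List.pyGetD ans y 0))
      (C * PySem.List.pyGetD ans z 0)
  let ans' := PySem.List.pySetD ans i temp
  ( ans',
    if temp = A * PySem.List.pyGetD ans' x 0 then x + 1 else x,
    if temp = B * PySem.List.pyGetD ans' y 0 then y + 1 else y,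
    if temp = C * PySem.List.pyGetD ans' z 0 then z + 1 else z )

def primes_sequence (A : Int) (B : Int) (C : Int) (D : Int) : List Int :=
  let k := D
  let ans0 := PySem.List.pySetD (List.replicate (k + 1).toNat (0 : Int)) 0 1
  let s := (PySem.List.pyRange 1 (k + 1) 1).foldl (pvStepA A B C) (ans0, 0, 0, 0)
  PySem.List.slice s.1 (some 1) none

-- ===== PORT B =====
-- B-side helper: the body of B's for-loop (state: result, and the three deques).
-- The headD reads are exact here: the queues are provably never empty, so the
-- Python deque[0] accesses never raise (proved in the lemmas).
def pvStepB (A : Int) (B : Int) (C : Int)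
    (s : List Int × List Int × List Int × List Int) : List Int × List Int × List Int × List Int :=
  let res := s.1
  let qa := s.2.1
  let qb := s.2.2.1
  let qc := s.2.2.2
  let t := min (min (qa.headD 0) (qb.headD 0)) (qc.headD 0)
  ( res ++ [t],
    (if qa.headD 0 = t then qa.tail else qa) ++ [A * t],
    (if qb.headD 0 = t then qb.tail else qb) ++ [B * t],
    (if qc.headD 0 = t then qc.tail else qc) ++ [C * t] )

def primes_sequence_alt (A : Int) (B : Int) (C : Int) (D : Int) : List Int :=
  ((PySem.List.pyRange 0 D 1).foldl (fun s _ => pvStepB A B C s) ([], [A], [B], [C])).1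

-- ===== PRECONDITION & SPEC =====
-- A raises IndexError (ans[0] = 1 on an empty preallocated list) exactly when D < 0;
-- Pre_ excludes only those crashing inputs.
def Pre_primes_sequence (A : Int) (B : Int) (C : Int) (D : Int) : Prop := 0 ≤ D
instance (A : Int) (B : Int) (C : Int) (D : Int) : Decidable (Pre_primes_sequence A B C D) := by
  unfold Pre_primes_sequence; infer_instance

def pvWitness_primes_sequence : Int × Int × Int × Int := (2, 3, 5, 4)

def Spec_primes_sequence (A : Int) (B : Int) (C : Int) (D : Int) (out : List Int) : Prop :=
  out = primes_sequence_alt A B C D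
instance (A : Int) (B : Int) (C : Int) (D : Int) (out : List Int) :
    Decidable (Spec_primes_sequence A B C D out) := by
  unfold Spec_primes_sequence; infer_instance

-- ===== CLAIM (what is proved, stated in full; the proofs are below) =====
def Claim_equal_primes_sequence : Prop := ∀ (A : Int) (B : Int) (C : Int) (D : Int),
  Dom_primes_sequence A B C D → Pre_primes_sequence A B C D →
  Spec_primes_sequence A B C D (primes_sequence A B C D)

-- ===== LEMMAS AND PROOFS =====

-- a foldl whose body ignores the list element is an iterate
lemma pv_foldl_const {σ : Type} (f : σ → σ) :
    ∀ (l : List Int) (s : σ), l.foldl (fun s _ => f s) s = f^[l.length] s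
  | [], _ => rfl
  | _ :: l, s => by
      simp only [List.foldl_cons, List.length_cons, Function.iterate_succ_apply]
      exact pv_foldl_const f l (f s)

-- setting at position l1.length writes into the head of l2
lemma pv_set_append {α : Type} : ∀ (l1 l2 : List α) (v : α),
    (l1 ++ l2).set l1.length v = l1 ++ l2.set 0 v
  | [], _, _ => rfl
  | a :: l1, l2, v => by
      simp only [List.cons_append, List.length_cons, List.set_cons_succ]
      rw [pv_set_append l1 l2 v]

-- the coupling invariant between A's (ans,x,y,z) and B's (res,qa,qb,qc)
lemma pv_main (A B C : Int) : ∀ (m : Nat) (p : List Int) (x y z : Nat),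
    x < p.length + 1 → y < p.length + 1 → z < p.length + 1 →
    ((PySem.List.pyRange ((p.length : Int) + 1) ((p.length : Int) + 1 + (m : Int)) 1).foldl
        (pvStepA A B C) ((1 :: p) ++ List.replicate m 0, (x : Int), (y : Int), (z : Int))).1
      = 1 :: ((pvStepB A B C)^[m]
          (p, ((1 :: p).drop x).map (fun v => A * v),
              ((1 :: p).drop y).map (fun v => B * v),
              ((1 :: p).drop z).map (fun v => C * v))).1 := by
  intro m
  induction m with
  | zero =>
      intro p x y z hx hy hz
      rw [PySem.List.pyRange_one_eq_nil (by omega)]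
      simp
  | succ m ih =>
      intro p x y z hx hy hz
      have hx' : x < (1 :: p).length := by simpa using hx
      have hy' : y < (1 :: p).length := by simpa using hy
      have hz' : z < (1 :: p).length := by simpa using hz
      rw [PySem.List.pyRange_one_cons (by push_cast; omega)]
      rw [List.foldl_cons]
      -- the values read by A
      have hget : ∀ (w : Nat) (hw : w < (1 :: p).length),
          PySem.List.pyGetD ((1 :: p) ++ List.replicate (m + 1) 0) (w : Int) 0 = (1 :: p)[w] := by
        intro w hw
        rw [PySem.List.pyGetD_natCast, List.getD_append _ _ _ _ hw, List.getD_eq_getElem _ _ hw]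
      -- the fronts read by B
      have hhead : ∀ (w : Nat) (M : Int) (hw : w < (1 :: p).length),
          (((1 :: p).drop w).map (fun v => M * v)).headD 0 = M * (1 :: p)[w] := by
        intro w M hw
        rw [List.drop_eq_getElem_cons hw]
        simp
      rw [Function.iterate_succ_apply]
      -- abbreviations
      have hL : (1 :: p).length = p.length + 1 := by simp
      -- the minimum both sides compute
      set t := min (min (A * (1 :: p)[x]) (B * (1 :: p)[y])) (C * (1 :: p)[z]) with ht
      -- A's write: ans[i] = temp lands at the head of the zero padding
      have hset : PySem.List.pySetD ((1 :: p) ++ List.replicate (m + 1) (0 : Int))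
          ((p.length : Int) + 1) t = (1 :: (p ++ [t])) ++ List.replicate m 0 := by
        have hc : ((p.length : Int) + 1) = (((p.length + 1 : Nat)) : Int) := by push_cast; ring
        rw [hc, PySem.List.pySetD_natCast, ← hL, pv_set_append, List.replicate_succ]
        simp
      -- reads from the updated list at an index below the filled prefix
      have hget' : ∀ (w : Nat) (hw : w < (1 :: p).length),
          PySem.List.pyGetD ((1 :: (p ++ [t])) ++ List.replicate m 0) (w : Int) 0
            = (1 :: p)[w] := by
        intro w hw
        have h1 : (1 :: (p ++ [t])) ++ List.replicate m (0 : Int)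
            = ((1 :: p) ++ [t]) ++ List.replicate m 0 := by simp
        have hw2 : w < ((1 :: p) ++ [t]).length := by simp at hw ⊢; omega
        rw [h1, PySem.List.pyGetD_natCast, List.getD_append _ _ _ _ hw2,
          List.getD_append _ _ _ _ hw, List.getD_eq_getElem _ _ hw]
      have hcif : ∀ (c : Prop) [Decidable c] (w : Nat),
          (if c then (w : Int) + 1 else (w : Int)) = (((if c then w + 1 else w : Nat)) : Int) := by
        intro c _ w; split_ifs <;> push_cast <;> ring
      -- one A-step from this state
      have hstepA : pvStepA A B C ((1 :: p) ++ List.replicate (m + 1) 0, (x : Int), (y : Int), (z : Int))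
            ((p.length : Int) + 1)
          = ((1 :: (p ++ [t])) ++ List.replicate m 0,
             ((if t = A * (1 :: p)[x] then x + 1 else x : Nat) : Int),
             ((if t = B * (1 :: p)[y] then y + 1 else y : Nat) : Int),
             ((if t = C * (1 :: p)[z] then z + 1 else z : Nat) : Int)) := by
        simp only [pvStepA, hget x hx', hget y hy', hget z hz', ← ht, hset,
          hget' x hx', hget' y hy', hget' z hz', hcif]
      -- one B-step from this state
      have hstepB : pvStepB A B C
            (p, ((1 :: p).drop x).map (fun v => A * v),
                ((1 :: p).drop y).map (fun v => B * v),
                ((1 :: p).drop z).map (fun v => C * v))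
          = (p ++ [t],
             ((1 :: (p ++ [t])).drop (if t = A * (1 :: p)[x] then x + 1 else x)).map (fun v => A * v),
             ((1 :: (p ++ [t])).drop (if t = B * (1 :: p)[y] then y + 1 else y)).map (fun v => B * v),
             ((1 :: (p ++ [t])).drop (if t = C * (1 :: p)[z] then z + 1 else z)).map (fun v => C * v)) := by
        have hq : ∀ (M : Int) (w : Nat) (hw : w < (1 :: p).length),
            (if M * (1 :: p)[w] = t
                then (((1 :: p).drop w).map (fun v => M * v)).tail
                else ((1 :: p).drop w).map (fun v => M * v)) ++ [M * t]
              = ((1 :: (p ++ [t])).drop (if t = M * (1 :: p)[w] then w + 1 else w)).map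
                  (fun v => M * v) := by
          intro M w hw
          have h1 : (1 :: (p ++ [t])) = (1 :: p) ++ [t] := by simp
          rw [h1]
          by_cases h : M * (1 :: p)[w] = t
          · rw [if_pos h, if_pos h.symm,
              List.drop_append_of_le_length (by omega), List.map_append, ← List.map_tail,
              List.tail_drop]
            simp
          · rw [if_neg h, if_neg (fun hh => h hh.symm),
              List.drop_append_of_le_length (by omega), List.map_append]
            simp
        simp only [pvStepB, hhead x A hx', hhead y B hy', hhead z C hz', ← ht]
        exact Prod.ext rfl (Prod.ext (hq A x hx') (Prod.ext (hq B y hy') (hq C z hz')))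
      rw [hstepA, hstepB]
      -- align the remaining range with the IH's shape
      have hrange : PySem.List.pyRange ((p.length : Int) + 1 + 1)
            ((p.length : Int) + 1 + ((m : Int) + 1)) 1
          = PySem.List.pyRange (((p ++ [t]).length : Int) + 1)
            (((p ++ [t]).length : Int) + 1 + (m : Int)) 1 := by
        congr 1 <;> push_cast [List.length_append, List.length_cons, List.length_nil] <;> ring
      have := ih (p ++ [t]) (if t = A * (1 :: p)[x] then x + 1 else x)
        (if t = B * (1 :: p)[y] then y + 1 else y) (if t = C * (1 :: p)[z] then z + 1 else z)
        (by split_ifs <;> simp <;> omega) (by split_ifs <;> simp <;> omega)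
        (by split_ifs <;> simp <;> omega)
      have hm1 : ((m + 1 : Nat) : Int) = (m : Int) + 1 := by push_cast; ring
      rw [hm1, hrange]
      simp only [List.cons_append, List.append_assoc] at this ⊢
      exact this

-- ===== VERDICT (by name: the statement is the Claim_ definition above) =====
theorem primes_sequence_spec : Claim_equal_primes_sequence := by
  intro A B C D hdom hpre
  unfold Pre_primes_sequence at hpre
  unfold Spec_primes_sequence primes_sequence primes_sequence_alt
  obtain ⟨m, rfl⟩ : ∃ m : Nat, D = (m : Int) := ⟨D.toNat, (Int.toNat_of_nonneg hpre).symm⟩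
  have hinit : PySem.List.pySetD (List.replicate ((m : Int) + 1).toNat (0 : Int)) 0 1
      = (1 :: ([] : List Int)) ++ List.replicate m 0 := by
    have h1 : ((m : Int) + 1).toNat = m + 1 := by omega
    rw [h1]
    simp [List.replicate_succ, PySem.List.pySetD, PySem.List.pySet?, PySem.List.pyIdx?]
  have hmain := pv_main A B C m [] 0 0 0 (by simp) (by simp) (by simp)
  simp only [List.length_nil, Nat.cast_zero, zero_add, List.drop_zero, List.map_cons,
    List.map_nil, mul_one] at hmain
  rw [pv_foldl_const (pvStepB A B C), PySem.List.length_pyRange_one]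
  simp only [hinit]
  rw [show ((m : Int) + 1) = 1 + (m : Int) by ring, hmain, PySem.List.slice_from_one]
  simp
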